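-- pv_equiv track=rewrite | github.com/csprinkl/AdventOfCode2025 | Day6/Part2/TrashCompactor.py | split_into_problems
-- ===== SOURCE A (Python) =====
-- def split_into_problems(columns):
--     """Group consecutive non-space columns into problem blocks."""
--     problems = []
--     current = []
--
--     for col in columns:
--         if all(c == ' ' for c in col):
--             if current:
--                 problems.append(current)
--                 current = []
--         else:
--             current.append(col)
--
--     if current:
--         problems.append(current)
--
--     return problems
-- ===== SOURCE B (Python) =====
-- from itertools import groupby
--
--
-- def split_into_problems(columns):
--     """Group consecutive non-space columns into problem blocks."""
--     is_space = lambda col: all(c == ' ' for c in col)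
--     return [list(g) for key, g in groupby(columns, key=is_space) if not key]
-- ===== Notes on version B (the rewrite author's own statement) =====
-- stated objective: idiomatic
-- what changed: Replaces the manual accumulator loop (current block flushed on separators, plus a trailing flush) with itertools.groupby keyed on all-space, keeping only the non-space runs.
import Mathlib
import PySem

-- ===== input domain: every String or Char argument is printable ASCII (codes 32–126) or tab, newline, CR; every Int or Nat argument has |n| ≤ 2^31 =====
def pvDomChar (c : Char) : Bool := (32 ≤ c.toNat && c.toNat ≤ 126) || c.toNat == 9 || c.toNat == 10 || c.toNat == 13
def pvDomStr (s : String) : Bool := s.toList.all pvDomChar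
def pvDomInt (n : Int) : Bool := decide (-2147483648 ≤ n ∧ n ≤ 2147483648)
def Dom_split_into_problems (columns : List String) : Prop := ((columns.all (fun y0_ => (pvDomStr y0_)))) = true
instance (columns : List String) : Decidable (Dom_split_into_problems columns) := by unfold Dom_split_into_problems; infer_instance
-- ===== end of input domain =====

-- B groups columns with a groupby keyed on the all-space predicate and keeps the non-space runs,
-- instead of A's accumulator loop (objective: idiomatic).


-- ===== PORT A =====
-- `all(c == ' ' for c in col)`
def pvIsSpaceCol (col : String) : Bool := col.toList.all (fun c => c == ' ')

-- the for-loop over `columns`, state = (problems, current)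
def pvLoopA : List String → List (List String) → List String → (List (List String) × List String)
  | [], problems, current => (problems, current)
  | col :: rest, problems, current =>
    if pvIsSpaceCol col then
      if current ≠ [] then pvLoopA rest (problems ++ [current]) []
      else pvLoopA rest problems current
    else pvLoopA rest problems (current ++ [col])

def split_into_problems (columns : List String) : List (List String) :=
  let st := pvLoopA columns [] []
  if st.2 ≠ [] then st.1 ++ [st.2] else st.1

-- ===== PORT B =====
-- itertools.groupby(columns, key=is_space): maximal runs of equal key, in order, as (key, run)
def pvGroupBy (key : String → Bool) : List String → List (Bool × List String)
  | [] => []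
  | c :: cs =>
    match pvGroupBy key cs with
    | (k, g) :: rest => if key c == k then (k, c :: g) :: rest else (key c, [c]) :: (k, g) :: rest
    | [] => [(key c, [c])]

def split_into_problems_alt (columns : List String) : List (List String) :=
  (pvGroupBy pvIsSpaceCol columns).filterMap (fun p => if p.1 then none else some p.2)

-- ===== PRECONDITION & SPEC =====
def Spec_split_into_problems (columns : List String) (out : List (List String)) : Prop := out = split_into_problems_alt columns
instance (columns : List String) (out : List (List String)) : Decidable (Spec_split_into_problems columns out) := by unfold Spec_split_into_problems; infer_instance

-- ===== CLAIM (what is proved, stated in full; the proofs are below) =====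
def Claim_equal_split_into_problems : Prop := ∀ (columns : List String), Dom_split_into_problems columns → Spec_split_into_problems columns (split_into_problems columns)

-- ===== LEMMAS AND PROOFS =====

-- proof helper: A's result from state (no accumulated problems), recursively
def pvG : List String → List String → List (List String)
  | [], current => if current ≠ [] then [current] else []
  | col :: rest, current =>
    if pvIsSpaceCol col then
      if current ≠ [] then current :: pvG rest [] else pvG rest []
    else pvG rest (current ++ [col])

def pvFilt (gs : List (Bool × List String)) : List (List String) :=
  gs.filterMap (fun p => if p.1 then none else some p.2)

-- proof helper: B's result with a pending non-empty current block prepended/merged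
def pvConsCur (current : List String) (gs : List (Bool × List String)) : List (List String) :=
  if current = [] then pvFilt gs
  else match gs with
    | (false, g) :: rest => (current ++ g) :: pvFilt rest
    | _ => current :: pvFilt gs

theorem pvLoopA_acc (columns : List String) (problems : List (List String)) (current : List String) :
    (if (pvLoopA columns problems current).2 = [] then (pvLoopA columns problems current).1
     else (pvLoopA columns problems current).1 ++ [(pvLoopA columns problems current).2])
      = problems ++ pvG columns current := by
  induction columns generalizing problems current with
  | nil => simp [pvLoopA, pvG]; split <;> simp_all
  | cons col rest ih =>
    by_cases h1 : pvIsSpaceCol col <;> by_cases h2 : current = [] <;>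
      simp [pvLoopA, pvG, h1, h2, ih, List.append_assoc]

theorem pvG_eq_consCur (columns : List String) (current : List String) :
    pvG columns current = pvConsCur current (pvGroupBy pvIsSpaceCol columns) := by
  induction columns generalizing current with
  | nil =>
    simp only [pvG, pvGroupBy, pvConsCur, pvFilt]
    split <;> simp_all
  | cons col rest ih =>
    simp only [pvG, pvGroupBy]
    by_cases hs : pvIsSpaceCol col <;>
      cases hg : pvGroupBy pvIsSpaceCol rest with
    | nil => simp [hs, ih, hg, pvConsCur, pvFilt] <;> split <;> simp_all
    | cons p ps =>
      obtain ⟨k, g⟩ := p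
      cases k <;> simp [hs, ih, hg, pvConsCur, pvFilt] <;> split <;> simp_all

-- ===== VERDICT (by name: the statement is the Claim_ definition above) =====
theorem split_into_problems_spec : Claim_equal_split_into_problems := by
  intro columns _
  unfold Spec_split_into_problems split_into_problems split_into_problems_alt
  simp only [ne_eq, ite_not]
  rw [pvLoopA_acc, pvG_eq_consCur]
  simp [pvConsCur, pvFilt]
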